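-- pv_equiv track=rewrite | github.com/prabhatbhootra/CPSC316 | Assignment1/scanit.py | removeSlashes
-- ===== SOURCE A (Python) =====
-- def removeSlashes(data):
--     start = 1
--     answer = data
--     while start < len(answer):
--         if answer[start] == '"' and answer[start - 1] == "\\":
--             answer = answer[0: start - 1] + answer[start:]
--         start += 1
--     if len(answer) > 1:
--         answer = answer[1: len(answer) - 1]
--     return answer
-- ===== SOURCE B (Python) =====
-- def removeSlashes(data):
--     # One left-to-right pass with a stack: a quote pops a preceding backslash.
--     out = []
--     for c in data:
--         if c == '"' and out and out[-1] == '\\':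
--             out[-1] = c
--         else:
--             out.append(c)
--     return ''.join(out[1:-1]) if len(out) > 1 else ''.join(out)
-- ===== Notes on version B (the rewrite author's own statement) =====
-- stated objective: alternative
-- what changed: A repeatedly re-slices the string inside a while-loop (each backslash removal copies the string and the scan pointer walks the mutated string); B does one left-to-right pass with a stack, letting a quote overwrite a preceding backslash, then strips the outer characters once.
import Mathlib
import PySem

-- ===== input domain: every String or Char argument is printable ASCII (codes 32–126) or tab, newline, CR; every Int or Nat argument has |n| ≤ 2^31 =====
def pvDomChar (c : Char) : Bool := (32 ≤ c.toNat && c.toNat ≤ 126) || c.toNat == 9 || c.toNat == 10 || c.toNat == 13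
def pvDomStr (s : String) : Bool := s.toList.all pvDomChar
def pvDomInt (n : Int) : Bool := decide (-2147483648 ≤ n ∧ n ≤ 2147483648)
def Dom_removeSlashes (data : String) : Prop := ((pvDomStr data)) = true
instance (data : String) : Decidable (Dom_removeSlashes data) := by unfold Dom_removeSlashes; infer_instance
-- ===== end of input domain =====

-- B replaces A's rescan-and-reslice while-loop (a string copy per removed backslash)
-- by one left-to-right stack pass (a quote overwrites a preceding backslash); same value.

-- ===== PORT A =====
-- A's while-loop: `start` scans `answer`; on a quote preceded by a backslash the
-- backslash is cut out (`answer[0:start-1] + answer[start:]`, which for the reachable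
-- 1 ≤ start ≤ len is exactly `take (start-1) ++ drop start`).
def removeSlashesLoop (fuel : Nat) (start : Nat) (answer : List Char) : List Char :=
  match fuel with
  | 0 => answer
  | fuel + 1 =>
    if start < answer.length then
      if PySem.List.pyGet? answer (start : Int) = some '"' ∧
         PySem.List.pyGet? answer ((start : Int) - 1) = some '\\' then
        removeSlashesLoop fuel (start + 1) (answer.take (start - 1) ++ answer.drop start)
      else
        removeSlashesLoop fuel (start + 1) answer
    else answer

def removeSlashes (data : String) : String :=
  let answer := removeSlashesLoop data.toList.length 1 data.toList
  String.ofList (if answer.length > 1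
             then PySem.List.slice answer (some 1) (some ((answer.length : Int) - 1))
             else answer)

-- ===== PORT B =====
-- Source B's stack `out` is kept reversed (top = head); `out[-1] = c` is `c :: out.tail`.
def removeSlashesAltStep (out : List Char) (c : Char) : List Char :=
  if c = '"' ∧ out.head? = some '\\' then c :: out.tail else c :: out

def removeSlashes_alt (data : String) : String :=
  let out := (data.toList.foldl removeSlashesAltStep []).reverse
  String.ofList (if out.length > 1
             then PySem.List.slice out (some 1) (some (-1))   -- out[1:-1]
             else out)

-- ===== PRECONDITION & SPEC =====
def Spec_removeSlashes (data : String) (out : String) : Prop := out = removeSlashes_alt data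
instance (data : String) (out : String) : Decidable (Spec_removeSlashes data out) := by unfold Spec_removeSlashes; infer_instance

-- ===== CLAIM (what is proved, stated in full; the proofs are below) =====
def Claim_equal_removeSlashes : Prop := ∀ (data : String), Dom_removeSlashes data → Spec_removeSlashes data (removeSlashes data)

-- ===== LEMMAS AND PROOFS =====

-- the two final slices agree on lists of length > 1
lemma slice_final_eq (L : List Char) (h : 1 < L.length) :
    PySem.List.slice L (some 1) (some ((L.length : Int) - 1))
      = PySem.List.slice L (some 1) (some (-1)) := by
  have hne : L ≠ [] := by intro h'; simp [h'] at h
  simp [PySem.List.slice, PySem.List.clampIdx, hne]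
  omega

-- A's loop, at a reachable state (scanned prefix = reversed stack `st`, nonempty,
-- one fuel unit per loop iteration), computes what B's fold computes on the
-- unscanned suffix.  After a removal the pointer sits one past the stack; the
-- skipped comparison (against the '"' just pushed) can never fire, so we peel one
-- more element there.
lemma loop_eq_fold : ∀ (fuel : Nat) (rest st : List Char), rest.length ≤ fuel → st ≠ [] →
    removeSlashesLoop fuel st.length (st.reverse ++ rest)
      = (rest.foldl removeSlashesAltStep st).reverse := by
  intro fuel
  induction fuel with
  | zero =>
      intro rest st hn _
      have : rest = [] := List.eq_nil_of_length_eq_zero (by omega)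
      subst this
      simp [removeSlashesLoop]
  | succ n ih =>
      intro rest st hn hst
      cases rest with
      | nil => simp [removeSlashesLoop]
      | cons c rest =>
        obtain ⟨h, t, rfl⟩ : ∃ h t, st = h :: t := by
          cases st with
          | nil => exact absurd rfl hst
          | cons a b => exact ⟨a, b, rfl⟩
        rw [removeSlashesLoop]
        have hlen : (h :: t).length < ((h :: t).reverse ++ c :: rest).length := by simp
        have hget1 : PySem.List.pyGet? ((h :: t).reverse ++ c :: rest) (((h :: t).length : Int))
            = some c := by
          have := PySem.List.pyGet?_append_length (pre := (h :: t).reverse) (y := c) (ys := rest)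
          simpa using this
        have hassoc : (h :: t).reverse ++ c :: rest = t.reverse ++ h :: c :: rest := by
          simp
        have hget0 : PySem.List.pyGet? ((h :: t).reverse ++ c :: rest) (((h :: t).length : Int) - 1)
            = some h := by
          rw [hassoc]
          have := PySem.List.pyGet?_append_length (pre := t.reverse) (y := h) (ys := c :: rest)
          have hcast : (((h :: t).length : Int) - 1) = ((t.reverse.length : Int)) := by
            simp
          rw [hcast]
          exact this
        rw [hget1, hget0, if_pos hlen]
        by_cases hc : c = '"' ∧ h = '\\'
        · rw [if_pos (by simp [hc.1, hc.2])]
          have htake : ((h :: t).reverse ++ c :: rest).take ((h :: t).length - 1) = t.reverse := by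
            rw [hassoc]
            have : t.reverse.length = (h :: t).length - 1 := by simp
            rw [← this, List.take_left]
          have hdrop : ((h :: t).reverse ++ c :: rest).drop (h :: t).length = c :: rest := by
            have : (h :: t).reverse.length = (h :: t).length := by simp
            rw [← this, List.drop_left]
          rw [htake, hdrop]
          have hstep : removeSlashesAltStep (h :: t) c = c :: t := by
            simp [removeSlashesAltStep, hc.1, hc.2]
          -- new answer = (c :: t).reverse ++ rest, pointer = (c :: t).length + 1
          have hre : t.reverse ++ c :: rest = (c :: t).reverse ++ rest := by simp
          have hlen2 : (h :: t).length + 1 = (c :: t).length + 1 := by simp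
          rw [hre, hlen2]
          cases rest with
          | nil =>
              cases n with
              | zero => simp [removeSlashesLoop, List.foldl, hstep]
              | succ m =>
                  rw [removeSlashesLoop]
                  simp [List.foldl, hstep]
          | cons e rest' =>
              -- the skipped comparison is against the '"' on top: B pushes e
              have hstep2 : removeSlashesAltStep (c :: t) e = e :: c :: t := by
                simp only [removeSlashesAltStep, List.head?_cons]
                rw [if_neg]
                intro ⟨_, h2⟩
                rw [hc.1] at h2
                exact absurd (Option.some.inj h2).symm (by decide)
              have hre2 : (c :: t).reverse ++ e :: rest' = (e :: c :: t).reverse ++ rest' := by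
                simp
              have hlen3 : (c :: t).length + 1 = (e :: c :: t).length := by simp
              rw [hre2, hlen3, ih rest' (e :: c :: t) (by simp at hn ⊢; omega) (by simp)]
              simp [List.foldl, hstep, hstep2]
        · rw [if_neg (by
            intro ⟨h1, h2⟩
            exact hc ⟨by simpa using h1, by simpa using h2⟩)]
          have hstep : removeSlashesAltStep (h :: t) c = c :: h :: t := by
            simp only [removeSlashesAltStep, List.head?_cons]
            rw [if_neg]
            intro ⟨h1, h2⟩
            exact hc ⟨h1, by simpa using h2⟩
          have hre : (h :: t).reverse ++ c :: rest = (c :: h :: t).reverse ++ rest := by simp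
          have hlen2 : (h :: t).length + 1 = (c :: h :: t).length := by simp
          rw [hre, hlen2, ih rest (c :: h :: t) (by simp at hn ⊢; omega) (by simp)]
          simp [List.foldl, hstep]

-- the two core scans produce the same list
lemma core_eq (l : List Char) :
    removeSlashesLoop l.length 1 l = (l.foldl removeSlashesAltStep []).reverse := by
  cases l with
  | nil => simp [removeSlashesLoop]
  | cons d r =>
      have h0 : removeSlashesAltStep [] d = [d] := by
        simp [removeSlashesAltStep]
      have := loop_eq_fold (d :: r).length r [d] (by simp) (by simp)
      simpa [List.foldl, h0] using this

-- ===== VERDICT (by name: the statement is the Claim_ definition above) =====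
theorem removeSlashes_spec : Claim_equal_removeSlashes := by
  intro data _
  unfold Spec_removeSlashes removeSlashes removeSlashes_alt
  rw [core_eq data.toList]
  set L := (data.toList.foldl removeSlashesAltStep []).reverse with hL
  by_cases h : 1 < L.length
  · simp only [h, slice_final_eq L h]
  · simp [h]
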